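-- pv_equiv track=rewrite | github.com/XenonPDash/Recognizing-Faces-in-the-Wild---Kinship-Verification | table.py | _pluck
-- ===== SOURCE A (Python) =====
-- def _pluck(pairs, indices):
--     ret = []
--     for index, pid in enumerate(indices):
--         for pair in pairs:
--             if pair[1] == pid:
--                 filepath = pair[0]
--                 ret.append([filepath, index])
--     return ret
-- ===== SOURCE B (Python) =====
-- def _pluck(pairs, indices):
--     by_pid = {}
--     for filepath, pid in pairs:
--         by_pid.setdefault(pid, []).append(filepath)
--     ret = []
--     for index, pid in enumerate(indices):
--         ret.extend([fp, index] for fp in by_pid.get(pid, []))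
--     return ret
-- ===== Notes on version B (the rewrite author's own statement) =====
-- stated objective: faster
-- what changed: Replaces the inner scan over pairs for every index with a dict pid->filepaths built once, then one pass over indices.
import Mathlib
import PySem

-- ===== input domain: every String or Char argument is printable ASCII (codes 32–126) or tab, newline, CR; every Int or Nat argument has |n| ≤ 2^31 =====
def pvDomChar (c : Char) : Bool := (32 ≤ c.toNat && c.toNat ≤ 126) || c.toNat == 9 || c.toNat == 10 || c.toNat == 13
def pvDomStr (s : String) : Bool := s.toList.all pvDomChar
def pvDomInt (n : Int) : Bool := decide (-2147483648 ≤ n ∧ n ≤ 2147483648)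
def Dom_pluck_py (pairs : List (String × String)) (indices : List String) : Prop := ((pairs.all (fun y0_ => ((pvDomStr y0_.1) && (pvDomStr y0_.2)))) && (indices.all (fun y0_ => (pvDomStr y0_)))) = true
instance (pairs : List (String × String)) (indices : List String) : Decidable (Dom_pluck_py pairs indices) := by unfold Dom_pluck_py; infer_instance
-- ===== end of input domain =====

-- B replaces A's inner scan over pairs per index with a pid→filepaths dict built once (asymptotically faster).


-- ===== PORT A =====
def pluck_py (pairs : List (String × String)) (indices : List String) : List (String × Int) :=
  (PySem.List.enumerate indices).foldl (fun ret ip =>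
    pairs.foldl (fun ret pair =>
      if pair.2 == ip.2 then ret ++ [(pair.1, ip.1)] else ret) ret) []

-- ===== PORT B =====
-- bucket.setdefault(pid, []).append(filepath) over pairs
def pluckIndex (pairs : List (String × String)) : PySem.Dict String (List String) :=
  pairs.foldl (fun d p => d.modify p.2 [] (· ++ [p.1])) PySem.Dict.empty

def pluck_py_alt (pairs : List (String × String)) (indices : List String) : List (String × Int) :=
  let d := pluckIndex pairs
  (PySem.List.enumerate indices).foldl (fun ret ip =>
    ret ++ (d.getD ip.2 []).map (fun fp => (fp, ip.1))) []

-- ===== PRECONDITION & SPEC =====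
def Spec_pluck_py (pairs : List (String × String)) (indices : List String) (out : List (String × Int)) : Prop := out = pluck_py_alt pairs indices
instance (pairs : List (String × String)) (indices : List String) (out : List (String × Int)) : Decidable (Spec_pluck_py pairs indices out) := by unfold Spec_pluck_py; infer_instance

-- ===== CLAIM (what is proved, stated in full; the proofs are below) =====
def Claim_equal_pluck_py : Prop := ∀ (pairs : List (String × String)) (indices : List String), Dom_pluck_py pairs indices → Spec_pluck_py pairs indices (pluck_py pairs indices)

-- ===== LEMMAS AND PROOFS =====

theorem pluckIndex_getD (pairs : List (String × String)) (pid : String) :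
    (pluckIndex pairs).getD pid [] = (pairs.filter (fun p => p.2 == pid)).map (·.1) := by
  suffices h : ∀ (d : PySem.Dict String (List String)),
      (pairs.foldl (fun d p => d.modify p.2 [] (· ++ [p.1])) d).getD pid []
        = d.getD pid [] ++ (pairs.filter (fun p => p.2 == pid)).map (·.1) by
    simpa [pluckIndex] using h PySem.Dict.empty
  induction pairs with
  | nil => simp
  | cons p ps ih =>
    intro d
    simp only [List.foldl_cons, ih, List.filter_cons]
    rw [PySem.Dict.getD_modify]
    by_cases h : p.2 = pid
    · simp [h]
    · simp [Ne.symm h, (by simpa using h : (p.2 == pid) = false)]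

theorem pluck_py_spec : Claim_equal_pluck_py := by
  intro pairs indices _
  unfold Spec_pluck_py pluck_py pluck_py_alt
  apply PySem.List.foldl_congr_mem
  intro ret ip _
  rw [pluckIndex_getD, List.map_map]
  exact PySem.List.foldl_append_if (fun pair => pair.2 == ip.2) (fun pair => (pair.1, ip.1)) pairs ret
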